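-- pv_equiv track=rewrite | github.com/kouyalong/StudyCode | python_data_structure/zhixianyun-kyl.py | loop_long_string
-- ===== SOURCE A (Python) =====
-- def loop_long_string(string: str) -> int:
--     """
--     :param string: 12字符串
--     :return: 最长12连续串的 长度
--     """
--     if not string:
--         return 0
--
--     # 考虑到首位可以12或者21连续的情况，分隔字符串使得最前面和最后面两个字符都一致
--     # 从前往后遍历，找到第一处连续的字符相同的位置，切断拼接到最后面
--     new_string = ""
--     n = len(string)
--     for i in range(n-1):
--         if string[i] == string[i+1]:
--             new_string = string[i+1:]+string[:i+1]
--             break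
--     if not new_string:
--         new_string = string
--
--     # 使用滑动窗口，找到最长的12连续串
--     i, j, max_loop = 0, 1, 0
--     while j < n:
--         if new_string[j-1] != new_string[j]:
--             max_loop = max(max_loop, j-i)
--         else:
--             i = j
--         j += 1
--
--     # 全为1 或者全为2的串  12串的长度为0
--     return max_loop + 1 if max_loop else 0
-- ===== SOURCE B (Python) =====
-- def loop_long_string(string: str) -> int:
--     """Idiomatic rewrite: double the string and do one run-length scan, capping at n."""
--     if not string:
--         return 0
--     n = len(string)
--     s = string + string
--     best = 1
--     cur = 1
--     prev = s[0]
--     for c in s[1:]: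
--         if c != prev:
--             cur += 1
--             if cur > best:
--                 best = cur
--         else:
--             cur = 1
--         prev = c
--     if best > n:
--         best = n
--     return best if best > 1 else 0
-- ===== Notes on version B (the rewrite author's own statement) =====
-- stated objective: idiomatic
-- what changed: Replaces A's find-first-equal-pair-then-rotate preprocessing plus index-based sliding window by the classic doubled-string trick: one run-length scan over string+string with the result capped at len(string).
import Mathlib
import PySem

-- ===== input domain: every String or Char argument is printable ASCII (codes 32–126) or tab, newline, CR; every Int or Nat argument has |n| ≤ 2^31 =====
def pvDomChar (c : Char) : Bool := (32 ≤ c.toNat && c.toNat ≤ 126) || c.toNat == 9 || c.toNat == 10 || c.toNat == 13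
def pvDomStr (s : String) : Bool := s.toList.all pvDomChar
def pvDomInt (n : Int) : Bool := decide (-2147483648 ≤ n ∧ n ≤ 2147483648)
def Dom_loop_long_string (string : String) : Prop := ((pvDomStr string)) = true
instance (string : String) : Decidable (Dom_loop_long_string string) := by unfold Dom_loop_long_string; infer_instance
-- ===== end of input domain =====

-- B replaces A's rotate-at-the-first-equal-pair preprocessing + index-based sliding window
-- by the classic doubled-string trick: one run-length scan over string+string, capped at len(string).

-- ===== PORT A =====
-- 'for i in range(n-1): if string[i] == string[i+1]: new_string = string[i+1:]+string[:i+1]; break'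
def pvFindRot (string : String) : List Int → String
  | [] => ""
  | i :: rest =>
    if PySem.Str.pyGet? string i = PySem.Str.pyGet? string (i + 1) then
      PySem.Str.slice string (some (i + 1)) none ++ PySem.Str.slice string none (some (i + 1))
    else pvFindRot string rest

-- 'while j < n: if new_string[j-1] != new_string[j]: max_loop = max(max_loop, j-i) else: i = j; j += 1'
def pvWindow (new : String) (js : List Int) (i maxl : Int) : Int :=
  match js with
  | [] => maxl
  | j :: rest =>
    if PySem.Str.pyGet? new (j - 1) ≠ PySem.Str.pyGet? new j then
      pvWindow new rest i (max maxl (j - i))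
    else
      pvWindow new rest j maxl

def loop_long_string (string : String) : Int :=
  if string = "" then 0
  else
    let n : Int := PySem.Str.len string
    let new0 := pvFindRot string (PySem.List.pyRange 0 (n - 1) 1)
    let new_string := if new0 = "" then string else new0
    let max_loop := pvWindow new_string (PySem.List.pyRange 1 n 1) 0 0
    if max_loop ≠ 0 then max_loop + 1 else 0

-- ===== PORT B =====
-- 'for c in s[1:]: if c != prev: cur += 1; best = max(best, cur) else: cur = 1; prev = c'
def pvScanB : List Char → Char → Int → Int → Int
  | [], _, _, best => best
  | c :: rest, prev, cur, best =>
    if c ≠ prev then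
      pvScanB rest c (cur + 1) (if cur + 1 > best then cur + 1 else best)
    else
      pvScanB rest c 1 best

def loop_long_string_alt (string : String) : Int :=
  if string = "" then 0
  else
    let n : Int := PySem.Str.len string
    let s := string ++ string
    match PySem.Str.pyGet? s 0 with
    | none => 0  -- unreachable: s is nonempty here, s[0] cannot raise
    | some prev =>
      let best := pvScanB (PySem.Str.slice s (some 1) none).toList prev 1 1
      let best := if best > n then n else best
      if best > 1 then best else 0

-- ===== PRECONDITION & SPEC =====
def Spec_loop_long_string (string : String) (out : Int) : Prop := out = loop_long_string_alt string
instance (string : String) (out : Int) : Decidable (Spec_loop_long_string string out) := by unfold Spec_loop_long_string; infer_instance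

-- ===== CLAIM (what is proved, stated in full; the proofs are below) =====
def Claim_equal_loop_long_string : Prop := ∀ (string : String), Dom_loop_long_string string → Spec_loop_long_string string (loop_long_string string)

-- ===== LEMMAS AND PROOFS =====

-- pvMext prev cur t = length of the longest maximal run of pairwise-distinct adjacent
-- characters in the virtual list (run of length `cur` ending in `prev`) ++ t.
def pvMext (prev : Char) (cur : Nat) : List Char → Nat
  | [] => cur
  | c :: t => if c = prev then max cur (pvMext c 1 t) else pvMext c (cur + 1) t

def pvM : List Char → Nat
  | [] => 0
  | c :: t => pvMext c 1 t

lemma pvMext_ge (t : List Char) : ∀ (prev : Char) (cur : Nat), cur ≤ pvMext prev cur t := by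
  induction t with
  | nil => intro prev cur; simp [pvMext]
  | cons c t ih =>
    intro prev cur
    simp only [pvMext]
    split_ifs with h
    · exact le_max_left _ _
    · exact le_trans (Nat.le_succ _) (ih c (cur + 1))

lemma pvMext_mono (t : List Char) : ∀ (prev : Char) (cur cur' : Nat), cur ≤ cur' →
    pvMext prev cur t ≤ pvMext prev cur' t := by
  induction t with
  | nil => intro prev cur cur' h; simpa [pvMext]
  | cons c t ih =>
    intro prev cur cur' h
    simp only [pvMext]
    split_ifs with hc
    · exact max_le_max h le_rfl
    · exact ih c (cur + 1) (cur' + 1) (by omega)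

lemma pvMext_le (t : List Char) : ∀ (prev : Char) (cur : Nat), pvMext prev cur t ≤ cur + t.length := by
  induction t with
  | nil => intro prev cur; simp [pvMext]
  | cons c t ih =>
    intro prev cur
    simp only [pvMext, List.length_cons]
    split_ifs with h
    · have h1 := ih c 1
      omega
    · have h1 := ih c (cur + 1)
      omega

lemma pvMext_break (a : List Char) : ∀ (prev : Char) (cur : Nat) (c : Char) (t : List Char),
    a.getLastD prev = c →
    pvMext prev cur (a ++ c :: t) = max (pvMext prev cur a) (pvMext c 1 t) := by
  induction a with
  | nil =>
    intro prev cur c t h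
    simp only [List.getLastD_nil] at h
    subst h
    simp [pvMext]
  | cons d a ih =>
    intro prev cur c t h
    simp only [List.getLastD_cons] at h
    simp only [List.cons_append, pvMext]
    split_ifs with hd
    · rw [ih d 1 c t h]
      omega
    · exact ih d (cur + 1) c t h

lemma pvMext_append_le (t : List Char) : ∀ (u : List Char) (prev : Char) (cur : Nat),
    pvMext prev cur t ≤ pvMext prev cur (t ++ u) := by
  induction t with
  | nil => intro u prev cur; simpa [pvMext] using pvMext_ge u prev cur
  | cons c t ih =>
    intro u prev cur
    simp only [List.cons_append, pvMext]
    split_ifs with h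
    · exact max_le_max le_rfl (ih u c 1)
    · exact ih u c (cur + 1)

lemma pvM_le_prepend (t : List Char) : ∀ (u : List Char) (prev : Char) (cur : Nat),
    pvM u ≤ pvMext prev cur (t ++ u) := by
  induction t with
  | nil =>
    intro u prev cur
    cases u with
    | nil => simp [pvM]
    | cons c u' =>
      simp only [List.nil_append, pvMext, pvM]
      split_ifs with h
      · exact le_max_right _ _
      · exact pvMext_mono u' c 1 (cur + 1) (by omega)
  | cons d t ih =>
    intro u prev cur
    simp only [List.cons_append, pvMext]
    split_ifs with h
    · exact le_trans (ih u d 1) (le_max_right _ _)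
    · exact ih u d (cur + 1)

lemma pvMext_chain (t : List Char) : ∀ (prev : Char) (cur : Nat),
    List.IsChain (· ≠ ·) (prev :: t) → pvMext prev cur t = cur + t.length := by
  induction t with
  | nil => intro prev cur _; simp [pvMext]
  | cons c t ih =>
    intro prev cur hch
    have h1 : prev ≠ c := (List.isChain_cons_cons.mp hch).1
    have h2 : List.IsChain (· ≠ ·) (c :: t) := (List.isChain_cons_cons.mp hch).2
    simp only [pvMext, if_neg (Ne.symm h1)]
    rw [ih c (cur + 1) h2]
    simp [List.length_cons]; omega

lemma pvM_le_length (t : List Char) : pvM t ≤ t.length := by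
  cases t with
  | nil => simp [pvM]
  | cons c t =>
    have := pvMext_le t c 1
    simp only [pvM, List.length_cons]
    omega

lemma pvM_break (x : Char) (a : List Char) (d : Char) (b : List Char)
    (h : a.getLastD x = d) :
    pvM ((x :: a) ++ (d :: b)) = max (pvM (x :: a)) (pvM (d :: b)) := by
  simp only [pvM, List.cons_append]
  exact pvMext_break a x 1 d b h

-- B's scan computes the running max of run lengths
lemma pvScanB_eq (t : List Char) : ∀ (prev : Char) (cur best : Nat),
    1 ≤ cur → cur ≤ best →
    pvScanB t prev (cur : Int) (best : Int) = ((max best (pvMext prev cur t) : Nat) : Int) := by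
  induction t with
  | nil =>
    intro prev cur best h1 h2
    simp only [pvScanB, pvMext]
    omega
  | cons c t ih =>
    intro prev cur best h1 h2
    simp only [pvScanB, pvMext]
    by_cases hc : c = prev
    · subst hc
      rw [if_neg (by simp), if_pos rfl]
      have h3 : pvScanB t c 1 (best : Int) = ((max best (pvMext c 1 t) : Nat) : Int) := by
        simpa using ih c 1 best le_rfl (by omega)
      rw [h3]
      have := pvMext_ge t c 1
      omega
    · rw [if_pos hc, if_neg hc]
      have hcast : ((cur : Int) + 1) = ((cur + 1 : Nat) : Int) := by omega
      rw [hcast]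
      have hbest : (if ((cur + 1 : Nat) : Int) > (best : Int) then ((cur + 1 : Nat) : Int) else (best : Int))
          = ((max best (cur + 1) : Nat) : Int) := by
        split_ifs <;> omega
      rw [hbest, ih c (cur + 1) (max best (cur + 1)) (by omega) (by omega)]
      have := pvMext_ge t c (cur + 1)
      omega

-- A's sliding window computes (max run length) - 1
lemma pvWindow_eq (rest : List Char) : ∀ (new : String) (jN iN mN : Nat) (prev : Char),
    new.toList.length = jN + rest.length →
    new.toList[jN - 1]? = some prev →
    new.toList.drop jN = rest →
    iN < jN → jN - iN ≤ mN + 1 →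
    pvWindow new (PySem.List.pyRange (jN : Int) ((jN : Int) + rest.length) 1) (iN : Int) (mN : Int)
      = ((max mN (pvMext prev (jN - iN) rest - 1) : Nat) : Int) := by
  induction rest with
  | nil =>
    intro new jN iN mN prev hlen hprev hdrop hij hm
    rw [List.length_nil, Nat.cast_zero, add_zero, PySem.List.pyRange_one_eq_nil le_rfl]
    simp only [pvWindow, pvMext]
    omega
  | cons c rest ih =>
    intro new jN iN mN prev hlen hprev hdrop hij hm
    have hcl : ((c :: rest).length : Int) = (rest.length : Int) + 1 := by
      simp [List.length_cons]
    have hjlt : (jN : Int) < (jN : Int) + ((c :: rest).length : Int) := by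
      rw [hcl]; omega
    rw [PySem.List.pyRange_one_cons hjlt]
    simp only [pvWindow]
    have hc : new.toList[jN]? = some c := by
      have h0 : (new.toList.drop jN)[0]? = some c := by rw [hdrop]; rfl
      rw [List.getElem?_drop] at h0
      simpa using h0
    have hgp : PySem.Str.pyGet? new ((jN : Int) - 1) = some prev := by
      have h1 : (jN : Int) - 1 = ((jN - 1 : Nat) : Int) := by omega
      rw [h1, PySem.Str.pyGet?_natCast, hprev]
    have hgc : PySem.Str.pyGet? new (jN : Int) = some c := by
      rw [PySem.Str.pyGet?_natCast, hc]
    have hdrop' : new.toList.drop (jN + 1) = rest := by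
      have h2 : new.toList.drop (jN + 1) = (new.toList.drop jN).drop 1 := by
        rw [List.drop_drop]
      rw [h2, hdrop]; rfl
    have hlen' : new.toList.length = (jN + 1) + rest.length := by
      rw [hlen]; simp [List.length_cons]; omega
    have hprev' : new.toList[jN + 1 - 1]? = some c := by simpa using hc
    have hcast1 : (jN : Int) + 1 = ((jN + 1 : Nat) : Int) := by omega
    have hcastlen : (jN : Int) + ((c :: rest).length : Int)
        = ((jN + 1 : Nat) : Int) + (rest.length : Int) := by
      rw [hcl]; push_cast; omega
    rw [hgp, hgc]
    by_cases hne : c = prev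
    · -- equal characters: i := j
      subst hne
      rw [if_neg (by simp)]
      rw [hcastlen, hcast1]
      rw [ih new (jN + 1) jN mN c hlen' hprev' hdrop' (by omega) (by omega)]
      rw [show pvMext c (jN - iN) (c :: rest) = max (jN - iN) (pvMext c 1 rest) from by
        simp [pvMext]]
      have := pvMext_ge rest c 1
      have hj1 : jN + 1 - jN = 1 := by omega
      rw [hj1]
      omega
    · -- distinct characters: max_loop := max(max_loop, j - i)
      have hne2 : ¬ prev = c := fun h => hne h.symm
      rw [if_pos (by simpa using hne2)]
      have hmax : max (mN : Int) ((jN : Int) - (iN : Int)) = ((max mN (jN - iN) : Nat) : Int) := by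
        omega
      rw [hcastlen, hcast1, hmax]
      rw [ih new (jN + 1) iN (max mN (jN - iN)) c hlen' hprev' hdrop' (by omega) (by omega)]
      rw [show pvMext prev (jN - iN) (c :: rest) = pvMext c (jN - iN + 1) rest from by
        simp [pvMext, hne]]
      have := pvMext_ge rest c (jN - iN + 1)
      have h2 : jN + 1 - iN = jN - iN + 1 := by omega
      rw [h2]
      omega

-- pvFindRot either finds no equal adjacent pair, or returns the rotation at one
lemma pvFindRot_spec (string : String) (js : List Int) :
    (pvFindRot string js = "" ∧ ∀ j ∈ js, PySem.Str.pyGet? string j ≠ PySem.Str.pyGet? string (j + 1))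
    ∨ (∃ j ∈ js, PySem.Str.pyGet? string j = PySem.Str.pyGet? string (j + 1) ∧
        pvFindRot string js
          = PySem.Str.slice string (some (j + 1)) none ++ PySem.Str.slice string none (some (j + 1))) := by
  induction js with
  | nil => left; simp [pvFindRot]
  | cons i rest ih =>
    by_cases h : PySem.Str.pyGet? string i = PySem.Str.pyGet? string (i + 1)
    · right
      exact ⟨i, by simp, h, by simp only [pvFindRot]; rw [if_pos h]⟩
    · rcases ih with ⟨he, hall⟩ | ⟨j, hj, heq, hres⟩
      · left
        refine ⟨by simp only [pvFindRot]; rw [if_neg h]; exact he, ?_⟩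
        intro j hj
        rcases List.mem_cons.mp hj with rfl | hj
        · exact h
        · exact hall j hj
      · right
        exact ⟨j, by simp [hj], heq, by simp only [pvFindRot]; rw [if_neg h]; exact hres⟩

-- the doubled string's max run equals the rotated string's max run (a break exists at jN)
lemma pvM_double (l : List Char) (jN : Nat) (hj : jN + 1 < l.length)
    (heq : l[jN]'(by omega) = l[jN + 1]'(by omega)) :
    pvM (l ++ l) = pvM (l.drop (jN + 1) ++ l.take (jN + 1)) := by
  set p := l.take (jN + 1) with hp
  set q := l.drop (jN + 1) with hq
  have hpl : p.length = jN + 1 := by rw [hp, List.length_take]; omega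
  have hql : q.length = l.length - (jN + 1) := by simp [hq]
  have hpne : p ≠ [] := by rw [hp]; apply List.ne_nil_of_length_pos; rw [List.length_take]; omega
  have hqne : q ≠ [] := by rw [hq]; apply List.ne_nil_of_length_pos; rw [List.length_drop]; omega
  obtain ⟨x, p', hpx⟩ := List.exists_cons_of_ne_nil hpne
  obtain ⟨d, q', hqd⟩ := List.exists_cons_of_ne_nil hqne
  have hpq : l = p ++ q := by simp [hp, hq]
  -- last of p = head of q (the equal adjacent pair)
  have hlastp : p.getLast? = some (l[jN]'(by omega)) := by
    rw [hp, List.getLast?_take]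
    simp only [List.getElem?_eq_getElem (by omega : jN + 1 - 1 < l.length)]
    simp
  have hq0 : q[0]? = l[jN + 1]? := by rw [hq, List.getElem?_drop]
  have hheadq : d = l[jN + 1]'(by omega) := by
    rw [hqd] at hq0
    simp only [List.getElem?_cons_zero] at hq0
    rw [List.getElem?_eq_getElem (by omega)] at hq0
    exact Option.some_inj.mp hq0
  have hlast : p'.getLastD x = d := by
    have h5 : p.getLast? = some d := by rw [hlastp, hheadq, heq]
    rw [hpx, List.getLast?_cons] at h5
    rw [List.getLastD_eq_getLast?]
    exact Option.some_inj.mp h5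
  have hlast2 : (q' ++ p).getLastD d = d := by
    have h6 : (q' ++ p).getLast? = p.getLast? := by
      exact List.getLast?_append_of_ne_nil _ hpne
    rw [List.getLastD_eq_getLast?, h6, hlastp, hheadq]
    simp [heq]
  -- l ++ l = p ++ (q ++ p ++ q), split at both junctions
  have e1 : l ++ l = (x :: p') ++ (d :: (q' ++ p ++ q)) := by
    rw [hpq, hpx, hqd]; simp
  have e2 : pvM (l ++ l) = max (pvM p) (pvM (d :: (q' ++ p ++ q))) := by
    rw [e1, pvM_break x p' d (q' ++ p ++ q) hlast, hpx]
  have e3 : (d :: (q' ++ p ++ q)) = (d :: (q' ++ p)) ++ (d :: q') := by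
    rw [hqd]; simp
  have e4 : pvM (d :: (q' ++ p ++ q)) = max (pvM (q ++ p)) (pvM q) := by
    rw [e3, pvM_break d (q' ++ p) d q' hlast2, hqd]
    simp
  -- p and q are both dominated by q ++ p
  have hple : pvM p ≤ pvM (q ++ p) := by
    rw [hqd]
    simpa [pvM] using pvM_le_prepend q' p d 1
  have hqle : pvM q ≤ pvM (q ++ p) := by
    rw [hqd]
    simpa [pvM] using pvMext_append_le q' p d 1
  rw [e2, e4]
  omega

-- assemble B's value for nonempty strings
lemma loop_alt_eval (string : String) (h : string ≠ "") :
    loop_long_string_alt string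
      = (if min (pvM (string.toList ++ string.toList)) string.toList.length > 1
         then ((min (pvM (string.toList ++ string.toList)) string.toList.length : Nat) : Int)
         else 0) := by
  obtain ⟨hd, tl, hht⟩ : ∃ hd tl, string.toList = hd :: tl := by
    cases hh : string.toList with
    | nil => exact absurd (String.toList_eq_nil_iff.mp hh) h
    | cons hd tl => exact ⟨hd, tl, rfl⟩
  have hsl : (string ++ string).toList = hd :: (tl ++ (hd :: tl)) := by
    simp [hht]
  have hget : PySem.Str.pyGet? (string ++ string) 0 = some hd := by
    rw [show (0 : Int) = ((0 : Nat) : Int) from rfl, PySem.Str.pyGet?_natCast, hsl]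
    rfl
  have hslice : (PySem.Str.slice (string ++ string) (some 1) none).toList = tl ++ (hd :: tl) := by
    simp only [PySem.Str.toList_slice, PySem.Chars.slice_eq_listSlice]
    rw [show (1 : Int) = ((1 : Nat) : Int) from rfl, PySem.List.slice_from_natCast, hsl]
    rfl
  have hlen : PySem.Str.len string = (string.toList.length : Int) := by simp [pysem]
  have hM : pvM (string.toList ++ string.toList) = pvMext hd 1 (tl ++ (hd :: tl)) := by
    rw [hht]; simp [pvM]
  have hge : 1 ≤ pvMext hd 1 (tl ++ (hd :: tl)) := pvMext_ge _ hd 1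
  have hlen2 : string.toList.length = tl.length + 1 := by rw [hht]; simp
  unfold loop_long_string_alt
  rw [if_neg h]
  dsimp only []
  rw [hget]
  dsimp only []
  rw [hslice]
  have hscan := pvScanB_eq (tl ++ (hd :: tl)) hd 1 1 le_rfl le_rfl
  norm_num at hscan
  rw [hscan, hlen, hM, hlen2]
  split_ifs <;> omega

-- A's value for nonempty strings whose rotation step produced new_string with toList = r
lemma loop_a_eval (new : String) (r : List Char) (hr : new.toList = r) (hne : r ≠ []) :
    pvWindow new (PySem.List.pyRange 1 (r.length : Int) 1) 0 0 = ((pvM r - 1 : Nat) : Int) := by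
  obtain ⟨c0, r', hcr⟩ := List.exists_cons_of_ne_nil hne
  have hlen : new.toList.length = 1 + r'.length := by rw [hr, hcr, List.length_cons]; omega
  have hprev : new.toList[1 - 1]? = some c0 := by rw [hr, hcr]; rfl
  have hdrop : new.toList.drop 1 = r' := by rw [hr, hcr]; rfl
  have hcast : (r.length : Int) = (1 : Int) + (r'.length : Int) := by
    rw [hcr]; simp [List.length_cons]; omega
  have hw := pvWindow_eq r' new 1 0 0 c0 hlen hprev hdrop (by omega) (by omega)
  norm_num at hw
  rw [hcast, hw]
  try rw [show pvM r = pvMext c0 1 r' from by rw [hcr]; simp [pvM]]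
  try omega

-- ===== VERDICT (by name: the statement is the Claim_ definition above) =====
theorem loop_long_string_spec : Claim_equal_loop_long_string := by
  intro string _
  unfold Spec_loop_long_string
  by_cases h : string = ""
  · subst h; rfl
  obtain ⟨hd, tl, hht⟩ : ∃ hd tl, string.toList = hd :: tl := by
    cases hh : string.toList with
    | nil => exact absurd (String.toList_eq_nil_iff.mp hh) h
    | cons hd tl => exact ⟨hd, tl, rfl⟩
  have hlen : PySem.Str.len string = (string.toList.length : Int) := by simp [pysem]
  have hn1 : 1 ≤ string.toList.length := by rw [hht]; simp
  rw [loop_alt_eval string h]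
  unfold loop_long_string
  rw [if_neg h]
  dsimp only []
  rw [hlen]
  rcases pvFindRot_spec string (PySem.List.pyRange 0 ((string.toList.length : Int) - 1) 1) with
    ⟨he, hall⟩ | ⟨j, hj, heq, hres⟩
  · -- no equal adjacent pair: string is fully alternating, new_string = string
    rw [he, if_pos rfl]
    rw [loop_a_eval string string.toList rfl (by rw [hht]; simp)]
    -- the whole string is one alternating run
    have hch : pvMext hd 1 tl = 1 + tl.length := by
      apply pvMext_chain
      rw [← hht]
      rw [List.isChain_iff_getElem]
      intro i hi
      have hmem : ((i : Nat) : Int) ∈ PySem.List.pyRange 0 ((string.toList.length : Int) - 1) 1 := by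
        rw [PySem.List.mem_pyRange_one]
        omega
      have hne := hall _ hmem
      intro hcontra
      apply hne
      rw [show ((i : Nat) : Int) + 1 = ((i + 1 : Nat) : Int) from by omega]
      rw [PySem.Str.pyGet?_natCast, PySem.Str.pyGet?_natCast]
      rw [List.getElem?_eq_getElem (by omega), List.getElem?_eq_getElem (by omega), hcontra]
    have hMl : pvM string.toList = string.toList.length := by
      rw [hht]; simp [pvM, hch, List.length_cons]; omega
    have hMll : string.toList.length ≤ pvM (string.toList ++ string.toList) := by
      have e : string.toList ++ string.toList = hd :: (tl ++ (hd :: tl)) := by rw [hht]; simp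
      rw [e]
      simp only [pvM]
      calc string.toList.length = pvMext hd 1 tl := by rw [← hMl, hht]; simp [pvM]
        _ ≤ pvMext hd 1 (tl ++ (hd :: tl)) := pvMext_append_le tl (hd :: tl) hd 1
    rw [hMl]
    split_ifs <;> omega
  · -- an equal adjacent pair exists at index j: new_string is the rotation there
    rw [PySem.List.mem_pyRange_one] at hj
    obtain ⟨jN, rfl⟩ : ∃ jN : Nat, j = (jN : Int) := ⟨j.toNat, by omega⟩
    have hjn : jN + 1 < string.toList.length := by omega
    have heqN : string.toList[jN]'(by omega) = string.toList[jN + 1]'(by omega) := by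
      rw [show (jN : Int) + 1 = ((jN + 1 : Nat) : Int) from by omega] at heq
      rw [PySem.Str.pyGet?_natCast, PySem.Str.pyGet?_natCast] at heq
      rw [List.getElem?_eq_getElem (by omega), List.getElem?_eq_getElem (by omega)] at heq
      exact Option.some_inj.mp heq
    have hrl : (pvFindRot string (PySem.List.pyRange 0 ((string.toList.length : Int) - 1) 1)).toList
        = string.toList.drop (jN + 1) ++ string.toList.take (jN + 1) := by
      rw [hres]
      simp only [String.toList_append, PySem.Str.toList_slice, PySem.Chars.slice_eq_listSlice]
      rw [show (jN : Int) + 1 = ((jN + 1 : Nat) : Int) from by omega]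
      rw [PySem.List.slice_from_natCast, PySem.List.slice_to_natCast]
    have hrlen : (string.toList.drop (jN + 1) ++ string.toList.take (jN + 1)).length
        = string.toList.length := by
      rw [List.length_append, List.length_drop, List.length_take]; omega
    have hrne : string.toList.drop (jN + 1) ++ string.toList.take (jN + 1) ≠ [] := by
      apply List.ne_nil_of_length_pos
      omega
    have hne0 : pvFindRot string (PySem.List.pyRange 0 ((string.toList.length : Int) - 1) 1) ≠ "" := by
      intro hc
      rw [hc] at hrl
      exact hrne (by simpa using hrl.symm)
    rw [if_neg hne0]
    have hw2 := loop_a_eval _ _ hrl hrne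
    rw [hrlen] at hw2
    rw [hw2]
    have hdouble : pvM (string.toList ++ string.toList)
        = pvM (string.toList.drop (jN + 1) ++ string.toList.take (jN + 1)) :=
      pvM_double string.toList jN hjn heqN
    have hrle : pvM (string.toList.drop (jN + 1) ++ string.toList.take (jN + 1))
        ≤ string.toList.length := by
      have := pvM_le_length (string.toList.drop (jN + 1) ++ string.toList.take (jN + 1))
      omega
    have hrge : 1 ≤ pvM (string.toList.drop (jN + 1) ++ string.toList.take (jN + 1)) := by
      obtain ⟨c0, r', hcr⟩ := List.exists_cons_of_ne_nil hrne
      rw [hcr]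
      simpa [pvM] using pvMext_ge r' c0 1
    rw [hdouble]
    split_ifs <;> omega
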